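-- pv_equiv track=rewrite | github.com/sjvrijn/ModEA | code/Utils.py | intToRepr
-- ===== SOURCE A (Python) =====
-- def intToRepr(integer):
--     """
--         Dencode the ES-structure from a single integer back to the mixed base-2 and 3 representation.
--         Reverse of :func:`~reprToInt`
--
--         >>> intToRepr(93)
--         >>> [0,0,0,0,0,1,0,1,0,1,0]
--
--         :param integer: Integer (e.g. outoutput from reprToInt() )
--         :returns:       String consisting of all structure choices concatenated,
--     """
--     # TODO FIXME Hardcoded
--     max_length = 11
--     factors = [2304, 1152, 576, 288, 144, 72, 36, 18, 9, 3, 1]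
--     representation = []
--     for i in range(max_length):
--         if integer >= factors[i]:
--             gene = integer // factors[i]
--             integer -= gene * factors[i]
--         else:
--             gene = 0
--         representation.append(gene)
--
--     return representation
-- ===== SOURCE B (Python) =====
-- def intToRepr(integer):
--     radices = [2, 2, 2, 2, 2, 2, 2, 2, 3, 3]  # per-digit radix, most-significant first (leading digit unbounded)
--     weight = 1
--     weights = []  # place value of each digit, least-significant first
--     for r in reversed(radices):
--         weights.append(weight)
--         weight *= r
--     # each digit is read off independently: (n // place_value) % radix;
--     # negative inputs clamp to n = 0, i.e. the all-zero representation
--     n = max(integer, 0)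
--     rep = [(n // w) % r for w, r in zip(weights, reversed(radices))]
--     rep.append(n // weight)
--     return rep[::-1]
-- ===== Notes on version B (the rewrite author's own statement) =====
-- stated objective: alternative
-- what changed: Replaces A's sequential greedy loop (running remainder against a hardcoded cumulative-factor table) with independent positional digit extraction: place values are derived from the radix list (eight twos then two threes) and each digit is (max(n,0) // place_value) % radix, built least-significant-first and reversed.
import Mathlib
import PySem

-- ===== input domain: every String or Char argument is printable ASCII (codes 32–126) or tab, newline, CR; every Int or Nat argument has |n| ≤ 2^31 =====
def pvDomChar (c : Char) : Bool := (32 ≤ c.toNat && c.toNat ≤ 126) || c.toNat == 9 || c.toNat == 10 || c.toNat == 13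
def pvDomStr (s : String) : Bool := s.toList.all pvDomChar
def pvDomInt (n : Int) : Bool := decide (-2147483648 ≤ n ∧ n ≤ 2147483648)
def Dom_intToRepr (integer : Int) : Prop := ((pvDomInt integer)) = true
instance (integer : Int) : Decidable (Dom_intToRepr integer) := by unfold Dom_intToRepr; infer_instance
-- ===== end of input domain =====

-- B drops A's running-remainder loop over the hardcoded cumulative-factor table and instead
-- reads each digit off independently as (n // place_value) % radix, with the place values
-- built from the radix list; negative inputs clamp to n = 0, i.e. the all-zero representation,
-- as in A (objective: alternative decomposition, same cost).

-- ===== PORT A =====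
def intToRepr (integer : Int) : List Int :=
  let max_length : Int := 11
  let factors : List Int := [2304, 1152, 576, 288, 144, 72, 36, 18, 9, 3, 1]
  -- factors[i]: i always lies in range 0..10, so the IndexError case never fires
  -- and the default value of pyGetD is never used
  let st := (PySem.List.pyRange 0 max_length).foldl
    (fun (st : Int × List Int) i =>
      let f := PySem.List.pyGetD factors i 0
      if st.1 ≥ f then
        let gene := PySem.Int.floordiv st.1 f
        (st.1 - gene * f, st.2 ++ [gene])
      else
        (st.1, st.2 ++ [0]))
    (integer, [])
  st.2

-- ===== PORT B =====
def intToRepr_alt (integer : Int) : List Int :=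
  let radices : List Int := [2, 2, 2, 2, 2, 2, 2, 2, 3, 3]
  -- for r in reversed(radices): weights.append(weight); weight *= r
  let ww := radices.reverse.foldl
    (fun (st : Int × List Int) r => (st.1 * r, st.2 ++ [st.1])) (1, [])
  let n := max integer 0
  let rep := (ww.2.zip radices.reverse).map
    (fun wr => PySem.Int.mod (PySem.Int.floordiv n wr.1) wr.2)
  (rep ++ [PySem.Int.floordiv n ww.1]).reverse

-- ===== PRECONDITION & SPEC =====
def Spec_intToRepr (integer : Int) (out : List Int) : Prop := out = intToRepr_alt integer
instance (integer : Int) (out : List Int) : Decidable (Spec_intToRepr integer out) := by unfold Spec_intToRepr; infer_instance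

-- ===== CLAIM (what is proved, stated in full; the proofs are below) =====
def Claim_equal_intToRepr : Prop := ∀ (integer : Int), Dom_intToRepr integer → Spec_intToRepr integer (intToRepr integer)

-- ===== LEMMAS AND PROOFS =====

-- the loop body of A, as a function of the current factor
def bodyA (st : Int × List Int) (f : Int) : Int × List Int :=
  if st.1 ≥ f then
    (st.1 - PySem.Int.floordiv st.1 f * f, st.2 ++ [PySem.Int.floordiv st.1 f])
  else
    (st.1, st.2 ++ [0])

-- the greedy digit chain A computes on a nonnegative remainder
def chain (r : Int) : List Int → List Int
  | [] => []
  | f :: fs => PySem.Int.floordiv r f :: chain (PySem.Int.mod r f) fs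

theorem stepA (r f : Int) (acc : List Int) (hf : 0 < f) (_hr : 0 ≤ r) :
    bodyA (r, acc) f = (PySem.Int.mod r f, acc ++ [PySem.Int.floordiv r f]) := by
  have hmod : PySem.Int.mod r f = r - PySem.Int.floordiv r f * f := by
    have := PySem.Int.floordiv_mul_add_mod r f
    omega
  unfold bodyA
  by_cases h : r ≥ f
  · rw [if_pos h]; simp [hmod]
  · have h0 : PySem.Int.floordiv r f = 0 := by
      rw [PySem.Int.floordiv_eq_iff_of_pos hf]; omega
    rw [if_neg h, hmod, h0]; simp

theorem mod_nn (r f : Int) (hf : 0 < f) (hr : 0 ≤ r) : 0 ≤ PySem.Int.mod r f := by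
  rw [PySem.Int.mod_eq_emod_of_pos hf]
  exact Int.emod_nonneg r (by omega)

theorem fold_pos : ∀ (fs : List Int) (r : Int) (acc : List Int), 0 ≤ r →
    (∀ f ∈ fs, 0 < f) → (fs.foldl bodyA (r, acc)).2 = acc ++ chain r fs := by
  intro fs
  induction fs with
  | nil => intro r acc _ _; simp [chain]
  | cons f fs ih =>
    intro r acc hr hfs
    have hf : 0 < f := hfs f (List.mem_cons_self ..)
    rw [List.foldl_cons, stepA r f acc hf hr, chain]
    rw [ih _ _ (mod_nn r f hf hr) (fun g hg => hfs g (List.mem_cons_of_mem _ hg))]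
    simp

theorem fold_neg : ∀ (fs : List Int) (r : Int) (acc : List Int), r < 0 →
    (∀ f ∈ fs, 0 < f) → fs.foldl bodyA (r, acc) = (r, acc ++ List.replicate fs.length 0) := by
  intro fs
  induction fs with
  | nil => intro r acc _ _; simp
  | cons f fs ih =>
    intro r acc hr hfs
    have hf : 0 < f := hfs f (List.mem_cons_self ..)
    rw [List.foldl_cons]
    have hb : bodyA (r, acc) f = (r, acc ++ [0]) := by
      unfold bodyA; rw [if_neg (by omega)]
    rw [hb, ih _ _ hr (fun g hg => hfs g (List.mem_cons_of_mem _ hg))]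
    simp [List.replicate_succ]

theorem A_as_fold (integer : Int) :
    intToRepr integer =
      (([2304, 1152, 576, 288, 144, 72, 36, 18, 9, 3, 1] : List Int).foldl bodyA (integer, [])).2 := by
  show (List.foldl
      (fun st i => bodyA st (PySem.List.pyGetD [2304, 1152, 576, 288, 144, 72, 36, 18, 9, 3, 1] i 0))
      (integer, []) (PySem.List.pyRange 0 11)).2 = _
  have h : PySem.List.pyRange 0 11 =
      PySem.List.pyRange 0 (PySem.List.len [(2304:Int), 1152, 576, 288, 144, 72, 36, 18, 9, 3, 1]) := by
    decide
  rw [h, PySem.List.foldl_pyRange_pyGetD _ 0 bodyA (integer, []) (by norm_num)]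
  simp

theorem main_eq (integer : Int) : intToRepr integer = intToRepr_alt integer := by
  rw [A_as_fold]
  by_cases hneg : integer < 0
  · have hm : max integer 0 = 0 := by omega
    rw [fold_neg [2304, 1152, 576, 288, 144, 72, 36, 18, 9, 3, 1] integer [] hneg (by decide)]
    simp only [intToRepr_alt, hm]
    decide
  · have hr : 0 ≤ integer := by omega
    have hm : max integer 0 = integer := by omega
    rw [fold_pos [2304, 1152, 576, 288, 144, 72, 36, 18, 9, 3, 1] integer [] hr (by decide)]
    simp only [intToRepr_alt, hm, chain, List.nil_append]
    norm_num [PySem.Int.mod_eq_emod_of_pos, PySem.Int.floordiv_eq_ediv_of_pos]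
    omega

-- ===== VERDICT (by name: the statement is the Claim_ definition above) =====
theorem intToRepr_spec : Claim_equal_intToRepr := by
  intro integer _
  exact main_eq integer
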